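-- pv_equiv track=rewrite | github.com/zeattacker/OpenViking | openviking/storage/queuefs/semantic_processor.py | _extract_abstract_from_overview
-- ===== SOURCE A (Python) =====
-- def _extract_abstract_from_overview(overview_content: str) -> str:
--     """Extract abstract from overview.md."""
--     lines = overview_content.split("\n")
--
--     # Skip header lines (starting with #)
--     content_lines = []
--     in_header = True
--
--     for line in lines:
--         if in_header and line.startswith("#"):
--             continue
--         elif in_header and line.strip():
--             in_header = False
--
--         if not in_header:
--             # Stop at first ##
--             if line.startswith("##"):
--                 break
--             if line.strip():
--                 content_lines.append(line.strip())
--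
--     return "\n".join(content_lines).strip()
-- ===== SOURCE B (Python) =====
-- def _process_line(line, state, out):
--     """Feed one completed line to the DFA; returns the next state."""
--     if state == 2:          # already past the abstract section
--         return 2
--     if state == 0:          # still in the leading header block
--         if line.startswith("#"):
--             return 0
--         if not line.strip():
--             return 0
--         state = 1           # first real content line: fall through
--     if line.startswith("##"):
--         return 2
--     if line.strip():
--         out.append(line.strip())
--     return 1
--
--
-- def _extract_abstract_from_overview(overview_content: str) -> str:
--     """Extract abstract from overview.md.
--
--     Character-level state machine: streams the characters once, assembling
--     each line on the fly and feeding it to a 3-state DFA (header / body /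
--     done), instead of splitting into a list of lines first.
--     """
--     out = []
--     state = 0
--     cur = []
--     for ch in overview_content:
--         if ch == "\n":
--             state = _process_line("".join(cur), state, out)
--             cur = []
--         else:
--             cur.append(ch)
--     _process_line("".join(cur), state, out)
--     return "\n".join(out).strip()
-- ===== Notes on version B (the rewrite author's own statement) =====
-- stated objective: alternative
-- what changed: Replaced A's split-into-lines-then-stateful-loop with a single character-level pass: a 3-state DFA (header/body/done) consumes the characters one by one, assembling each line on the fly and never materialising the line list.
import Mathlib
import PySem

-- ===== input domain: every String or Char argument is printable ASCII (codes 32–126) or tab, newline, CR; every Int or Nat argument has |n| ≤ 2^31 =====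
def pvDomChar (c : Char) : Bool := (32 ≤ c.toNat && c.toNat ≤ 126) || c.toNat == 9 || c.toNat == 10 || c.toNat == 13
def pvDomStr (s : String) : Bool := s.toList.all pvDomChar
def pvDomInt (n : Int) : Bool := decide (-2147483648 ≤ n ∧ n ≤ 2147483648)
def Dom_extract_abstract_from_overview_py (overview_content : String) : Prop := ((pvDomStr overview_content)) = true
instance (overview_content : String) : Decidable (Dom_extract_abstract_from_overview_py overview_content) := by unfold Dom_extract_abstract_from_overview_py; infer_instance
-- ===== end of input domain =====

-- B replaces A's split-into-lines + stateful loop by a single character-level 3-state DFA pass (alternative; same cost).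

-- ===== PORT A =====
-- A's for-loop with the in_header flag and the break, as structural recursion over the lines.
def pvAloop (ls : List String) (inHeader : Bool) (acc : List String) : List String :=
  match ls with
  | [] => acc
  | l :: rest =>
    if inHeader && PySem.Str.startswith l "#" then
      pvAloop rest inHeader acc                     -- continue
    else
      let inHeader' := if inHeader && PySem.Str.strip l ≠ "" then false else inHeader
      if inHeader' = false then
        if PySem.Str.startswith l "##" then acc     -- break
        else if PySem.Str.strip l ≠ "" then pvAloop rest inHeader' (acc ++ [PySem.Str.strip l])
        else pvAloop rest inHeader' acc
      else pvAloop rest inHeader' acc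

def extract_abstract_from_overview_py (overview_content : String) : String :=
  let lines := (PySem.Str.split? overview_content "\n").getD []   -- sep "\n" ≠ "", so split? is always `some`
  PySem.Str.strip (PySem.Str.join "\n" (pvAloop lines true []))

-- ===== PORT B =====
-- B's _process_line: feed one completed line to the DFA (states 0 = header, 1 = body, 2 = done).
def pvProcess (line : List Char) (st : Nat) (out : List String) : Nat × List String :=
  if st = 2 then (2, out)
  else if st = 0 && PySem.Chars.startswith line ['#'] then (0, out)
  else if st = 0 && (PySem.Chars.strip line).isEmpty then (0, out)
  else  -- state is (now) 1: body
    if PySem.Chars.startswith line ['#', '#'] then (2, out)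
    else if ¬ (PySem.Chars.strip line).isEmpty then
      (1, out ++ [String.ofList (PySem.Chars.strip line)])
    else (1, out)

-- B's per-character step: accumulate the current line, flush it to the DFA at '\n'.
def pvBstep (s : Nat × List Char × List String) (ch : Char) : Nat × List Char × List String :=
  if ch = '\n' then
    let r := pvProcess s.2.1 s.1 s.2.2
    (r.1, [], r.2)
  else (s.1, s.2.1 ++ [ch], s.2.2)

def extract_abstract_from_overview_py_alt (overview_content : String) : String :=
  let fin := overview_content.toList.foldl pvBstep (0, [], [])
  let r := pvProcess fin.2.1 fin.1 fin.2.2          -- flush the last (unterminated) line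
  PySem.Str.strip (PySem.Str.join "\n" r.2)

-- ===== PRECONDITION & SPEC =====
def Spec_extract_abstract_from_overview_py (overview_content : String) (out : String) : Prop := out = extract_abstract_from_overview_py_alt overview_content
instance (overview_content : String) (out : String) : Decidable (Spec_extract_abstract_from_overview_py overview_content out) := by unfold Spec_extract_abstract_from_overview_py; infer_instance

-- ===== CLAIM (what is proved, stated in full; the proofs are below) =====
def Claim_equal_extract_abstract_from_overview_py : Prop := ∀ (overview_content : String), Dom_extract_abstract_from_overview_py overview_content → Spec_extract_abstract_from_overview_py overview_content (extract_abstract_from_overview_py overview_content)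

-- ===== LEMMAS AND PROOFS =====

-- line splitting as plain structural recursion (proof-side mirror of splitOn · ['\n'])
def pvLineAux (cur : List Char) : List Char → List (List Char)
  | [] => [cur]
  | c :: rest => if c = '\n' then cur :: pvLineAux [] rest else pvLineAux (cur ++ [c]) rest

-- the DFA run over a list of completed lines
def pvLines (lls : List (List Char)) (st : Nat) (out : List String) : Nat × List String :=
  match lls with
  | [] => (st, out)
  | l :: rest =>
    let r := pvProcess l st out
    pvLines rest r.1 r.2

lemma pvSplitOn_go (fuel : Nat) (l cur : List Char) (acc : List (List Char))
    (h : l.length < fuel) :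
    PySem.Chars.splitOn.go ['\n'] fuel l cur acc =
      acc.reverse ++ pvLineAux cur.reverse l := by
  induction fuel generalizing l cur acc with
  | zero => omega
  | succ fuel ih =>
    cases l with
    | nil => simp [PySem.Chars.splitOn.go, pvLineAux]
    | cons c rest =>
      by_cases hc : c = '\n'
      · subst hc
        have hpre : List.isPrefixOf ['\n'] ('\n' :: rest) = true := by
          simp [List.isPrefixOf]
        simp only [PySem.Chars.splitOn.go, hpre, if_pos]
        rw [show List.drop (['\n'].length) ('\n' :: rest) = rest from rfl,
          ih rest [] (cur.reverse :: acc) (by simpa using Nat.lt_of_succ_lt_succ h)]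
        simp [pvLineAux]
      · have hpre : List.isPrefixOf ['\n'] (c :: rest) = false := by
          simp only [List.isPrefixOf, Bool.and_eq_false_iff, beq_eq_false_iff_ne, ne_eq]
          exact Or.inl fun h => hc h.symm
        simp only [PySem.Chars.splitOn.go, hpre, Bool.false_eq_true, if_false]
        rw [ih rest (c :: cur) acc (by simpa using Nat.lt_of_succ_lt_succ h)]
        simp [pvLineAux, hc]

lemma pvSplitOn_eq (cs : List Char) :
    PySem.Chars.splitOn cs ['\n'] = pvLineAux [] cs := by
  unfold PySem.Chars.splitOn
  rw [pvSplitOn_go (cs.length + 1) cs [] [] (by omega)]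
  simp

-- B's character fold followed by the final flush = the DFA run over the completed lines
lemma pvFold_eq_lines (cs : List Char) (st : Nat) (cur : List Char) (out : List String) :
    (let fin := cs.foldl pvBstep (st, cur, out); pvProcess fin.2.1 fin.1 fin.2.2) =
      pvLines (pvLineAux cur cs) st out := by
  induction cs generalizing st cur out with
  | nil => simp [pvLineAux, pvLines]
  | cons c rest ih =>
    by_cases hc : c = '\n'
    · subst hc
      simp only [List.foldl_cons, pvBstep, pvLineAux]
      exact ih _ _ _
    · simp only [List.foldl_cons, pvBstep, hc, if_neg, not_false_iff, pvLineAux]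
      exact ih _ _ _

lemma pvHash : "#".toList = ['#'] := by decide
lemma pvHash2 : "##".toList = ['#', '#'] := by decide

-- a line that does not start with '#' does not start with '##' either
lemma pvNotHash2 (l : List Char) (h : PySem.Chars.startswith l ['#'] = false) :
    PySem.Chars.startswith l ['#', '#'] = false := by
  by_contra hc
  rw [Bool.not_eq_false, PySem.Chars.startswith_iff] at hc
  have h1 : ['#'] <+: l := List.IsPrefix.trans (by decide) hc
  rw [← PySem.Chars.startswith_iff] at h1
  rw [h1] at h
  simp at h

-- once in state 2 the DFA keeps the output unchanged (A's `break`)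
lemma pvLines_done (lls : List (List Char)) (out : List String) :
    pvLines lls 2 out = (2, out) := by
  induction lls with
  | nil => rfl
  | cons l rest ih => simp [pvLines, pvProcess, ih]

-- the DFA run agrees with A's line loop (state 0 ↔ in_header, state 1 ↔ body)
lemma pvLines_eq_aloop (lls : List (List Char)) (st : Nat) (hst : st = 0 ∨ st = 1)
    (out : List String) :
    (pvLines lls st out).2 =
      pvAloop (lls.map String.ofList) (st = 0) out := by
  induction lls generalizing st out with
  | nil => cases hst <;> subst_vars <;> simp [pvLines, pvAloop]
  | cons l rest ih =>
    have hstrip : PySem.Str.strip (String.ofList l) = String.ofList (PySem.Chars.strip l) := by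
      apply String.toList_injective
      simp [PySem.Str.toList_strip, String.toList_ofList]
    have hsw : ∀ p : String, PySem.Str.startswith (String.ofList l) p
        = PySem.Chars.startswith l p.toList := by
      intro p; simp [PySem.Str.startswith_eq, String.toList_ofList]
    have hempty : (PySem.Str.strip (String.ofList l) = "") ↔ PySem.Chars.strip l = [] := by
      rw [hstrip]
      constructor
      · intro h; have := congrArg String.toList h; simpa [String.toList_ofList] using this
      · intro h; rw [h]
    rcases hst with h0 | h1
    · subst h0
      by_cases hs : PySem.Chars.startswith l ['#'] = true
      · -- header '#' line: skipped
        simp only [pvLines, pvProcess, pvAloop, List.map_cons]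
        simp [hs, pvHash, ih 0 (Or.inl rfl)]
      · rw [Bool.not_eq_true] at hs
        by_cases hb : PySem.Chars.strip l = []
        · -- blank header line: skipped
          simp only [pvLines, pvProcess, pvAloop, List.map_cons]
          have hb' : PySem.Str.strip (String.ofList l) = "" := hempty.mpr hb
          simp [hs, hb, hb', pvHash, ih 0 (Or.inl rfl)]
        · -- first content line: becomes body, cannot start with '##'
          have h2 := pvNotHash2 l hs
          have hb' : ¬ PySem.Str.strip (String.ofList l) = "" := by
            intro h; exact absurd (hempty.mp h) hb
          simp only [pvLines, pvProcess, pvAloop, List.map_cons]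
          simp [hs, hb, h2, pvHash, pvHash2, hstrip, List.isEmpty_iff, ih 1 (Or.inr rfl)]
    · subst h1
      by_cases h2 : PySem.Chars.startswith l ['#', '#'] = true
      · -- section heading: A breaks, B's DFA goes to state 2 and ignores the rest
        simp only [pvLines, pvProcess, pvAloop, List.map_cons]
        simp [h2, pvHash2, pvLines_done]
      · rw [Bool.not_eq_true] at h2
        by_cases hb : PySem.Chars.strip l = []
        · have hb' : PySem.Str.strip (String.ofList l) = "" := hempty.mpr hb
          simp only [pvLines, pvProcess, pvAloop, List.map_cons]
          simp [h2, hb, hb', pvHash2, ih 1 (Or.inr rfl)]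
        · have hb' : ¬ PySem.Str.strip (String.ofList l) = "" := by
            intro h; exact absurd (hempty.mp h) hb
          simp only [pvLines, pvProcess, pvAloop, List.map_cons]
          simp [h2, hb, hstrip, pvHash2, List.isEmpty_iff, ih 1 (Or.inr rfl)]

-- ===== VERDICT (by name: the statement is the Claim_ definition above) =====
theorem extract_abstract_from_overview_py_spec : Claim_equal_extract_abstract_from_overview_py := by
  intro s _
  show extract_abstract_from_overview_py s = extract_abstract_from_overview_py_alt s
  simp only [extract_abstract_from_overview_py, extract_abstract_from_overview_py_alt,
    PySem.Str.split?]
  have hsplit : PySem.Chars.split? s.toList "\n".toList =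
      some (pvLineAux [] s.toList) := by
    simp [PySem.Chars.split?, pvSplitOn_eq, show ("\n").toList = ['\n'] from by decide]
  rw [hsplit]
  rw [pvFold_eq_lines s.toList 0 [] []]
  rw [pvLines_eq_aloop (pvLineAux [] s.toList) 0 (Or.inl rfl) []]
  simp
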